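-- pv_equiv track=rewrite | github.com/dakbal-study/baekjun-algorithm | 이소현/25.06.17/택배배달과수거하기.py | solution
-- ===== SOURCE A (Python) =====
-- def solution(cap, n, deliveries, pickups):
--     answer = 0
--     d = 0  # 배달 잔여 물량
--     p = 0  # 수거 잔여 물량
--
--     # 가장 멀리 있는 집부터 처리하기 위해 리스트를 역순으로 사용
--     deliveries.reverse()
--     pickups.reverse()
--
--     for i in range(n):
--         d += deliveries[i]
--         p += pickups[i]
--         # 배달이나 수거할 물량이 남아있다면
--         while d > 0 or p > 0:
--             d -= cap
--             p -= cap
--             answer += (n - i) * 2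
--
--     return answer
-- ===== SOURCE B (Python) =====
-- def solution(cap, n, deliveries, pickups):
--     # Same observable mutation as A: both lists reversed in place.
--     deliveries.reverse()
--     pickups.reverse()
--     cum_d = cum_p = trips = total = 0
--     for i in range(n):
--         cum_d += deliveries[i]
--         cum_p += pickups[i]
--         # trips needed so far = max of the two ceil-divisions, monotone in i
--         trips = max(trips, -(-cum_d // cap), -(-cum_p // cap))
--         total += trips
--     return 2 * total
-- ===== Notes on version B (the rewrite author's own statement) =====
-- stated objective: simpler
-- what changed: A simulates the truck per house with an inner while-loop that carries leftover capacity state (d, p) across houses; B keeps two running cumulative sums and a monotone trip counter obtained from two ceiling divisions, summing the counter once per house (the (n-i)-weighted sum is Abel-summed away), so the inner loop and the carried stock disappear.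
-- outside the precondition, e.g. on solution(0, 1, [0], [0]): A returns 0, B raises ZeroDivisionError; on solution(-1, 1, [-2], [0]): A returns 0, B returns 4
import Mathlib
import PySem

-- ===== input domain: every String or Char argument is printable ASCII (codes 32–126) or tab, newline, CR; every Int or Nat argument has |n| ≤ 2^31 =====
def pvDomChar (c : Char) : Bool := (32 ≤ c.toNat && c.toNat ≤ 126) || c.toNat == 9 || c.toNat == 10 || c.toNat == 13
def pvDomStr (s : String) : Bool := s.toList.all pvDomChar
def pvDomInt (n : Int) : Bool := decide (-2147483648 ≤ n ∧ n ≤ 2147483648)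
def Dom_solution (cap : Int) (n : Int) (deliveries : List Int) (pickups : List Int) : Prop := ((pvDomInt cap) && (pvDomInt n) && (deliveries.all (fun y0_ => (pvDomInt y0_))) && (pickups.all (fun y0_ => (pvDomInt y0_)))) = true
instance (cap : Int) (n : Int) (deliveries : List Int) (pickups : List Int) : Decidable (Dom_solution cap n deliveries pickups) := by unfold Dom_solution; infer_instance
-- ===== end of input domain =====

-- B replaces A's carried-stock while-loop simulation with a single cumulative-sum sweep using
-- ceiling divisions (objective: simpler).  Both A and B reverse the two list arguments in place
-- (same observable mutation); the equivalence proved here is about the return value.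

-- ===== PORT A =====
-- the inner `while d > 0 or p > 0` loop; the Nat fuel is only a totality device — under
-- Pre_solution (1 ≤ cap) the fuel supplied at the call site (d.toNat + p.toNat) never runs out.
def aWhile (cap inc : Int) : Nat → Int → Int → Int → Int × Int × Int
  | 0, d, p, ans => (d, p, ans)
  | fuel+1, d, p, ans =>
      if 0 < d ∨ 0 < p then aWhile cap inc fuel (d - cap) (p - cap) (ans + inc)
      else (d, p, ans)

def solution (cap : Int) (n : Int) (deliveries : List Int) (pickups : List Int) : Int :=
  let dr := deliveries.reverse
  let pr := pickups.reverse
  ((PySem.List.pyRange 0 n 1).foldl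
    (fun (st : Int × Int × Int) i =>
      let d := st.2.1 + (PySem.List.pyGet? dr i).getD 0
      let p := st.2.2 + (PySem.List.pyGet? pr i).getD 0
      let r := aWhile cap ((n - i) * 2) (d.toNat + p.toNat) d p st.1
      (r.2.2, r.1, r.2.1))
    (0, 0, 0)).1

-- ===== PORT B =====
-- Python's ceiling division -(-a // cap)
def ceilDiv (a cap : Int) : Int := -(PySem.Int.floordiv (-a) cap)

def solution_alt (cap : Int) (n : Int) (deliveries : List Int) (pickups : List Int) : Int :=
  let dr := deliveries.reverse
  let pr := pickups.reverse
  2 * ((PySem.List.pyRange 0 n 1).foldl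
    (fun (st : Int × Int × Int × Int) i =>
      let cd := st.2.1 + (PySem.List.pyGet? dr i).getD 0
      let cp := st.2.2.1 + (PySem.List.pyGet? pr i).getD 0
      let k := max st.2.2.2 (max (ceilDiv cd cap) (ceilDiv cp cap))
      (st.1 + k, cd, cp, k))
    (0, 0, 0, 0)).1

-- ===== PRECONDITION & SPEC =====
-- When the loop runs (n ≥ 1), Pre_ excludes cap ≤ 0 (A loops forever whenever some prefix sum
-- is positive; where it does return, B's ceiling division by cap ≤ 0 cannot match) and n > len
-- (A raises IndexError); for n ≤ 0 the loop body never runs and nothing is excluded.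
def Pre_solution (cap : Int) (n : Int) (deliveries : List Int) (pickups : List Int) : Prop :=
  n ≤ 0 ∨ (1 ≤ cap ∧ n ≤ (deliveries.length : Int) ∧ n ≤ (pickups.length : Int))
instance (cap : Int) (n : Int) (deliveries : List Int) (pickups : List Int) : Decidable (Pre_solution cap n deliveries pickups) := by unfold Pre_solution; infer_instance

def pvWitness_solution : Int × Int × List Int × List Int := (4, 2, [1, 0], [0, 3])

def Spec_solution (cap : Int) (n : Int) (deliveries : List Int) (pickups : List Int) (out : Int) : Prop := out = solution_alt cap n deliveries pickups
instance (cap : Int) (n : Int) (deliveries : List Int) (pickups : List Int) (out : Int) : Decidable (Spec_solution cap n deliveries pickups out) := by unfold Spec_solution; infer_instance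

-- ===== CLAIM (what is proved, stated in full; the proofs are below) =====
def Claim_equal_solution : Prop := ∀ (cap : Int) (n : Int) (deliveries : List Int) (pickups : List Int), Dom_solution cap n deliveries pickups → Pre_solution cap n deliveries pickups → Spec_solution cap n deliveries pickups (solution cap n deliveries pickups)

-- ===== LEMMAS AND PROOFS =====

theorem ceilDiv_spec (a cap : Int) (h : 1 ≤ cap) :
    (ceilDiv a cap - 1) * cap < a ∧ a ≤ ceilDiv a cap * cap :=
  (PySem.Int.neg_floordiv_neg_eq_iff_of_pos (by omega)).mp rfl

theorem ceilDiv_shift (a cap k : Int) (h : cap ≠ 0) :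
    ceilDiv (a - cap * k) cap = ceilDiv a cap - k := by
  unfold ceilDiv
  have h1 : -(a - cap * k) = -a + k * cap := by ring
  rw [h1]
  change -(Int.fdiv (-a + k * cap) cap) = -(Int.fdiv (-a) cap) - k
  rw [Int.add_mul_fdiv_right _ _ h]
  ring

theorem ceilDiv_nonpos (a cap : Int) (h : 1 ≤ cap) (ha : a ≤ 0) : ceilDiv a cap ≤ 0 := by
  have hs := ceilDiv_spec a cap h
  by_contra hq
  push_neg at hq
  nlinarith [hs.1]

theorem ceilDiv_pos (a cap : Int) (h : 1 ≤ cap) (ha : 0 < a) : 1 ≤ ceilDiv a cap := by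
  have hs := ceilDiv_spec a cap h
  by_contra hq
  push_neg at hq
  nlinarith [hs.2]

-- total number of iterations of the inner while-loop, as a function of the entering stock
def M (cap d p : Int) : Int := max 0 (max (ceilDiv d cap) (ceilDiv p cap))

theorem M_zero (cap d p : Int) (h : 1 ≤ cap) (hd : d ≤ 0) (hp : p ≤ 0) : M cap d p = 0 := by
  have h1 := ceilDiv_nonpos d cap h hd
  have h2 := ceilDiv_nonpos p cap h hp
  unfold M; omega

theorem M_step (cap d p : Int) (h : 1 ≤ cap) (hdp : 0 < d ∨ 0 < p) :
    M cap d p = M cap (d - cap) (p - cap) + 1 := by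
  have hone : 0 < d → 1 ≤ ceilDiv d cap := fun hd => ceilDiv_pos d cap h hd
  have hone' : 0 < p → 1 ≤ ceilDiv p cap := fun hp => ceilDiv_pos p cap h hp
  have hd1 : ceilDiv (d - cap) cap = ceilDiv d cap - 1 := by
    have := ceilDiv_shift d cap 1 (by omega); simpa using this
  have hp1 : ceilDiv (p - cap) cap = ceilDiv p cap - 1 := by
    have := ceilDiv_shift p cap 1 (by omega); simpa using this
  unfold M
  rw [hd1, hp1]
  rcases hdp with hd | hp
  · have := hone hd; omega
  · have := hone' hp; omega

theorem aWhile_eq (cap inc : Int) (h : 1 ≤ cap) :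
    ∀ (fuel : Nat) (d p ans : Int), d.toNat + p.toNat ≤ fuel →
      aWhile cap inc fuel d p ans =
        (d - cap * M cap d p, p - cap * M cap d p, ans + inc * M cap d p) := by
  intro fuel
  induction fuel with
  | zero =>
      intro d p ans hf
      have hd : d ≤ 0 := by omega
      have hp : p ≤ 0 := by omega
      simp [aWhile, M_zero cap d p h hd hp]
  | succ fuel ih =>
      intro d p ans hf
      by_cases hdp : 0 < d ∨ 0 < p
      · have hfuel : (d - cap).toNat + (p - cap).toNat ≤ fuel := by omega
        have hrec := ih (d - cap) (p - cap) (ans + inc) hfuel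
        simp only [aWhile, if_pos hdp, hrec, M_step cap d p h hdp]
        refine Prod.ext (by ring) (Prod.ext (by ring) (by ring))
      · push_neg at hdp
        simp [aWhile, hdp.1.not_gt, hdp.2.not_gt,
              M_zero cap d p h hdp.1 hdp.2]

-- the loop invariant tying A's fold state (ans, d, p) to B's fold state (total, cd, cp, k)
theorem fold_inv (cap n : Int) (hc : 1 ≤ cap) (dr pr : List Int) :
    ∀ (fuel : Nat) (i ansA d p total cd cp k : Int),
      (n - i).toNat ≤ fuel →
      d = cd - cap * k → p = cp - cap * k → d ≤ 0 → p ≤ 0 → 0 ≤ k →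
      (i ≤ n ∨ k = 0) →
      ansA = 2 * ((n - i) * k + total) →
      ((PySem.List.pyRange i n 1).foldl
        (fun (st : Int × Int × Int) j =>
          let d' := st.2.1 + (PySem.List.pyGet? dr j).getD 0
          let p' := st.2.2 + (PySem.List.pyGet? pr j).getD 0
          let r := aWhile cap ((n - j) * 2) (d'.toNat + p'.toNat) d' p' st.1
          (r.2.2, r.1, r.2.1)) (ansA, d, p)).1
      = 2 * ((PySem.List.pyRange i n 1).foldl
        (fun (st : Int × Int × Int × Int) j =>
          let cd' := st.2.1 + (PySem.List.pyGet? dr j).getD 0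
          let cp' := st.2.2.1 + (PySem.List.pyGet? pr j).getD 0
          let k' := max st.2.2.2 (max (ceilDiv cd' cap) (ceilDiv cp' cap))
          (st.1 + k', cd', cp', k')) (total, cd, cp, k)).1 := by
  intro fuel
  induction fuel with
  | zero =>
      intro i ansA d p total cd cp k hf hd hp hd0 hp0 hk0 hik hans
      have hni : n ≤ i := by omega
      rw [PySem.List.pyRange_one_eq_nil hni]
      simp only [List.foldl_nil]
      have : (n - i) * k = 0 := by
        rcases hik with hle | hk
        · have : n = i := le_antisymm hni hle
          simp [this]
        · simp [hk]
      omega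
  | succ fuel ih =>
      intro i ansA d p total cd cp k hf hd hp hd0 hp0 hk0 hik hans
      by_cases hin : i < n
      · rw [PySem.List.pyRange_one_cons hin]
        simp only [List.foldl_cons]
        set x := (PySem.List.pyGet? dr i).getD 0 with hx
        set y := (PySem.List.pyGet? pr i).getD 0 with hy
        set cd' := cd + x with hcd'
        set cp' := cp + y with hcp'
        set k' := max k (max (ceilDiv cd' cap) (ceilDiv cp' cap)) with hk'
        have hM : M cap (d + x) (p + y) = k' - k := by
          have h1 : d + x = cd' - cap * k := by rw [hd]; ring
          have h2 : p + y = cp' - cap * k := by rw [hp]; ring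
          rw [h1, h2]
          unfold M
          rw [ceilDiv_shift cd' cap k (by omega), ceilDiv_shift cp' cap k (by omega)]
          omega
        have hW := aWhile_eq cap ((n - i) * 2) hc ((d + x).toNat + (p + y).toNat)
          (d + x) (p + y) ansA (le_refl _)
        have hcd'le : cd' ≤ ceilDiv cd' cap * cap := (ceilDiv_spec cd' cap hc).2
        have hcp'le : cp' ≤ ceilDiv cp' cap * cap := (ceilDiv_spec cp' cap hc).2
        have hkk' : k ≤ k' := le_max_left _ _
        have hd0' : cd' - cap * k' ≤ 0 := by
          have h1 : ceilDiv cd' cap ≤ k' := le_trans (le_max_left _ _) (le_max_right _ _)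
          nlinarith
        have hp0' : cp' - cap * k' ≤ 0 := by
          have h1 : ceilDiv cp' cap ≤ k' := le_trans (le_max_right _ _) (le_max_right _ _)
          nlinarith
        have := ih (i + 1) (ansA + (n - i) * 2 * (k' - k)) (cd' - cap * k') (cp' - cap * k')
          (total + k') cd' cp' k' (by omega)
          (by ring) (by ring) hd0' hp0' (by omega) (by omega)
          (by rw [hans]; ring)
        simp only [hW, hM] at *
        convert this using 4
        simp only [Prod.mk.injEq]
        constructor
        · rw [hd]; ring
        · rw [hp]; ring
      · have hni : n ≤ i := by omega
        rw [PySem.List.pyRange_one_eq_nil hni]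
        simp only [List.foldl_nil]
        have : (n - i) * k = 0 := by
          rcases hik with hle | hk
          · have : n = i := le_antisymm hni hle
            simp [this]
          · simp [hk]
        omega

-- ===== VERDICT (by name: the statement is the Claim_ definition above) =====
theorem solution_spec : Claim_equal_solution := by
  intro cap n deliveries pickups _ hpre
  unfold Spec_solution solution solution_alt
  rcases hpre with hn | ⟨hc, _, _⟩
  · rw [PySem.List.pyRange_one_eq_nil hn]
    simp
  exact fold_inv cap n hc deliveries.reverse pickups.reverse
    (n - 0).toNat 0 0 0 0 0 0 0 0 (le_refl _)
    (by ring) (by ring) le_rfl le_rfl le_rfl (Or.inr rfl) (by ring)
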